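-- pv_equiv track=rewrite | github.com/DrBidoof/comp254001alwynlynchfall202 | AlwynLynch_COMP254Lab2/LabAssignment2/LabAssignment2/Exercises.py | example5
-- ===== SOURCE A (Python) =====
-- from typing import List
--
-- def example5(first: List[int], second: List[int]) -> int:
--     """
--     Returns the number of times second[i] equals the sum of prefix sums of first.
--     Assumes equal-length arrays, matching the Java.
--     """
--     n = len(first)                # 3
--     count = 0                     # 1
--     for i in range(n):            # 2n+1
--         total = 0                 # n
--         for j in range(n):        # 2n+1
--             for k in range(j + 1):# n^2+2n
--                 total += first[k] # 1.5n^2 + 1.5n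
--         if second[i] == total:    # 2
--             count += 1            # 1
--     return count                  # 1
-- ===== SOURCE B (Python) =====
-- def example5(first, second):
--     n = len(first)
--     total = 0
--     for k, v in enumerate(first):
--         total += (n - k) * v
--     count = 0
--     for x in second[:n]:
--         if x == total:
--             count += 1
--     return count
-- ===== Notes on version B (the rewrite author's own statement) =====
-- stated objective: faster
-- what changed: Replaces the cubic triple loop (which recomputes the same prefix-sum aggregate for every i) by computing total once as sum((n-k)*first[k]) in one pass and then a single counting pass over second[:n].
import Mathlib
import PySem

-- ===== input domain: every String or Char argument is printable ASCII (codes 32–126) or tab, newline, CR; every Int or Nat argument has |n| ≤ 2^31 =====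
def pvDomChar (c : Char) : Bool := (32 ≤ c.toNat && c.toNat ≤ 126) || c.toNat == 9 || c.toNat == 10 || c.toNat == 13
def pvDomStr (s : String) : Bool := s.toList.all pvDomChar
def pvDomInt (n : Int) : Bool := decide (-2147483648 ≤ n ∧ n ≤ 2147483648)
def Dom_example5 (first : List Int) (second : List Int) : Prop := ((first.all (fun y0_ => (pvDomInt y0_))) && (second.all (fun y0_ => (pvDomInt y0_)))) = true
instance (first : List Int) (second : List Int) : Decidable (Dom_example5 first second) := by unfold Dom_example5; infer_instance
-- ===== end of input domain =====

-- B computes the fixed aggregate total once in O(n) and counts matches in one pass; A is the literal O(n^3) triple loop.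

-- ===== PORT A =====
def example5 (first : List Int) (second : List Int) : Int :=
  let n : Int := PySem.List.len first
  (PySem.List.pyRange 0 n 1).foldl (fun count i =>
    let total : Int :=
      (PySem.List.pyRange 0 n 1).foldl (fun t j =>
        (PySem.List.pyRange 0 (j + 1) 1).foldl (fun t k =>
          t + PySem.List.pyGetD first k 0) t) 0
    if PySem.List.pyGetD second i 0 = total then count + 1 else count) 0

-- ===== PORT B =====
def example5_alt (first : List Int) (second : List Int) : Int :=
  let n : Int := PySem.List.len first
  let total : Int :=
    (PySem.List.enumerate first 0).foldl (fun t p => t + (n - p.1) * p.2) 0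
  (PySem.List.slice second none (some n)).foldl
    (fun count x => if x = total then count + 1 else count) 0

-- ===== PRECONDITION & SPEC =====
-- Pre_ excludes exactly the inputs where A raises IndexError: second shorter than first.
def Pre_example5 (first : List Int) (second : List Int) : Prop :=
  first.length ≤ second.length
instance (first : List Int) (second : List Int) : Decidable (Pre_example5 first second) := by
  unfold Pre_example5; infer_instance
def pvWitness_example5 : List Int × List Int := ([1, 2], [5, 3, 3])

def Spec_example5 (first : List Int) (second : List Int) (out : Int) : Prop := out = example5_alt first second
instance (first : List Int) (second : List Int) (out : Int) : Decidable (Spec_example5 first second out) := by unfold Spec_example5; infer_instance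

-- ===== CLAIM (what is proved, stated in full; the proofs are below) =====
def Claim_equal_example5 : Prop := ∀ (first : List Int) (second : List Int), Dom_example5 first second → Pre_example5 first second → Spec_example5 first second (example5 first second)

-- ===== LEMMAS AND PROOFS =====

-- the inner k-loop adds the prefix sum of the first m elements
lemma inner_loop_sum (xs : List Int) (m : Nat) (hm : m ≤ xs.length) (t : Int) :
    (PySem.List.pyRange 0 (m : Int) 1).foldl (fun t k => t + PySem.List.pyGetD xs k 0) t
      = t + (xs.take m).sum := by
  induction m generalizing t with
  | zero => simp [PySem.List.pyRange_one_eq_nil]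
  | succ m ih =>
    rw [show ((m + 1 : Nat) : Int) = (m : Int) + 1 by push_cast; ring,
        PySem.List.pyRange_one_succ_right (by positivity), List.foldl_append]
    rw [ih (by omega)]
    simp only [List.foldl_cons, List.foldl_nil, PySem.List.pyGetD_natCast]
    rw [List.take_add_one, List.sum_append, List.getD_eq_getElem?_getD]
    have : xs[m]? = some xs[m] := List.getElem?_eq_getElem (by omega)
    simp [this]
    ring

-- closed form for the middle j-loop (A's total), as a sum of prefix sums
lemma mid_loop_sum (xs : List Int) (m : Nat) (hm : m ≤ xs.length) (t : Int) :
    (PySem.List.pyRange 0 (m : Int) 1).foldl (fun t j =>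
        (PySem.List.pyRange 0 (j + 1) 1).foldl (fun t k => t + PySem.List.pyGetD xs k 0) t) t
      = t + ((List.range m).map (fun j => (xs.take (j + 1)).sum)).sum := by
  induction m generalizing t with
  | zero => simp [PySem.List.pyRange_one_eq_nil]
  | succ m ih =>
    rw [show ((m + 1 : Nat) : Int) = (m : Int) + 1 by push_cast; ring,
        PySem.List.pyRange_one_succ_right (by positivity), List.foldl_append]
    rw [ih (by omega)]
    simp only [List.foldl_cons, List.foldl_nil]
    rw [show ((m : Int) + 1) = ((m + 1 : Nat) : Int) by push_cast; ring,
        inner_loop_sum xs (m + 1) (by omega)]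
    rw [List.range_succ]
    simp
    ring

-- reindexing the start of enumerate shifts the mapped index
lemma enum_map_shift {α : Type} (xs : List α) (s : Int) (g : Int → α → Int) :
    (PySem.List.enumerate xs (s + 1)).map (fun p => g p.1 p.2)
      = (PySem.List.enumerate xs s).map (fun p => g (p.1 + 1) p.2) := by
  induction xs generalizing s with
  | nil => simp [PySem.List.enumerate_nil]
  | cons x xs ih =>
    simp only [PySem.List.enumerate_cons, List.map_cons]
    rw [show s + 1 + 1 = (s + 1) + 1 by ring, ih (s + 1)]

-- B's total (weighted single pass) equals A's sum of prefix sums, for any weight offset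
lemma weighted_eq_prefix (xs : List Int) (c : Int) :
    ((PySem.List.enumerate xs 0).map (fun p => (c + (xs.length : Int) - p.1) * p.2)).sum
      = ((List.range xs.length).map (fun j => (xs.take (j + 1)).sum)).sum
        + c * xs.sum := by
  induction xs generalizing c with
  | nil => simp [PySem.List.enumerate_nil]
  | cons x xs ih =>
    simp only [PySem.List.enumerate_cons, List.map_cons, List.sum_cons, List.length_cons]
    rw [show (0 : Int) + 1 = 0 + 1 by ring,
        enum_map_shift xs 0 (fun k v => (c + ((xs.length + 1 : Nat) : Int) - k) * v)]
    have h1 : ((PySem.List.enumerate xs 0).map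
        (fun p => (c + ((xs.length + 1 : Nat) : Int) - (p.1 + 1)) * p.2)).sum
        = ((PySem.List.enumerate xs 0).map
        (fun p => (c + (xs.length : Int) - p.1) * p.2)).sum := by
      congr 1; apply List.map_congr_left; intro p _; push_cast; ring
    rw [h1, ih c]
    have h2 : ((List.range (xs.length + 1)).map
        (fun j => ((x :: xs).take (j + 1)).sum)).sum
        = ((xs.length + 1 : Nat) : Int) * x
          + ((List.range (xs.length + 1)).map (fun j => (xs.take j).sum)).sum := by
      have : ∀ j, ((x :: xs).take (j + 1)).sum = x + (xs.take j).sum := by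
        intro j; simp [List.take_succ_cons]
      simp only [this]
      rw [PySem.List.sum_map_add_int, PySem.List.sum_map_const_int]
      simp [mul_comm]
    have h3 : ((List.range (xs.length + 1)).map (fun j => (xs.take j).sum)).sum
        = ((List.range xs.length).map (fun j => (xs.take (j + 1)).sum)).sum := by
      rw [List.range_succ_eq_map]
      simp [Function.comp_def]
    rw [h2, h3]
    push_cast
    ring

-- counting loop over indices = counting fold over the taken prefix
lemma count_loop (ys : List Int) (m : Nat) (hm : m ≤ ys.length) (T acc : Int) :
    (PySem.List.pyRange 0 (m : Int) 1).foldl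
        (fun count i => if PySem.List.pyGetD ys i 0 = T then count + 1 else count) acc
      = (ys.take m).foldl (fun count x => if x = T then count + 1 else count) acc := by
  induction m generalizing acc with
  | zero => simp [PySem.List.pyRange_one_eq_nil]
  | succ m ih =>
    rw [show ((m + 1 : Nat) : Int) = (m : Int) + 1 by push_cast; ring,
        PySem.List.pyRange_one_succ_right (by positivity), List.foldl_append]
    rw [ih (by omega), List.take_add_one, List.foldl_append]
    have : ys[m]? = some ys[m] := List.getElem?_eq_getElem (by omega)
    simp [this, List.getD_eq_getElem?_getD]

-- ===== VERDICT (by name: the statement is the Claim_ definition above) =====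
theorem example5_spec : Claim_equal_example5 := by
  intro first second _ hpre
  unfold Spec_example5 example5 example5_alt
  simp only [PySem.List.len_eq]
  have htot : (PySem.List.pyRange 0 (first.length : Int) 1).foldl (fun t j =>
      (PySem.List.pyRange 0 (j + 1) 1).foldl (fun t k => t + PySem.List.pyGetD first k 0) t) 0
      = (PySem.List.enumerate first 0).foldl
          (fun t p => t + ((first.length : Int) - p.1) * p.2) 0 := by
    rw [mid_loop_sum first first.length le_rfl 0,
        PySem.List.foldl_add (l := PySem.List.enumerate first 0) (a := 0)
          (fun p : Int × Int => ((first.length : Int) - p.1) * p.2)]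
    have := weighted_eq_prefix first 0
    simp only [zero_add, zero_mul, add_zero] at this ⊢
    rw [this]
  simp only [htot]
  rw [count_loop second first.length hpre _ 0, PySem.List.slice_to_natCast]
  rfl
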